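-- pv_equiv track=rewrite | github.com/alonsoir/test-zeromq-c- | ml-training/scripts/rag_shield/SemanticFeatureGenerator.py | _categorize_word
-- ===== SOURCE A (Python) =====
-- def _categorize_word(word: str) -> str:
--     """Categoriza palabra en tema general"""
--     categories = {
--         "medical": ["patient", "doctor", "treatment", "medical"],
--         "technical": ["server", "database", "api", "system"],
--         "security": ["password", "access", "secure", "auth"],
--         "general": ["the", "and", "for", "with", "how"]
--     }
--
--     for category, keywords in categories.items():
--         if word in keywords:
--             return category
--     return "other"
-- ===== SOURCE B (Python) =====
-- # Sorted keyword table searched by binary search instead of per-category scans.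
-- _SORTED = [
--     ("access", "security"), ("and", "general"), ("api", "technical"),
--     ("auth", "security"), ("database", "technical"), ("doctor", "medical"),
--     ("for", "general"), ("how", "general"), ("medical", "medical"),
--     ("password", "security"), ("patient", "medical"), ("secure", "security"),
--     ("server", "technical"), ("system", "technical"), ("the", "general"),
--     ("treatment", "medical"), ("with", "general"),
-- ]
--
--
-- def _categorize_word(word: str) -> str:
--     """Categoriza palabra en tema general"""
--     lo, hi = 0, len(_SORTED)
--     while lo < hi:
--         mid = (lo + hi) // 2
--         key, category = _SORTED[mid]
--         if key < word:
--             lo = mid + 1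
--         elif word < key:
--             hi = mid
--         else:
--             return category
--     return "other"
-- ===== Notes on version B (the rewrite author's own statement) =====
-- stated objective: alternative
-- what changed: Replaced the per-category linear membership scans with a statically sorted (keyword, category) table searched by hand-written binary search.
import Mathlib
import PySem

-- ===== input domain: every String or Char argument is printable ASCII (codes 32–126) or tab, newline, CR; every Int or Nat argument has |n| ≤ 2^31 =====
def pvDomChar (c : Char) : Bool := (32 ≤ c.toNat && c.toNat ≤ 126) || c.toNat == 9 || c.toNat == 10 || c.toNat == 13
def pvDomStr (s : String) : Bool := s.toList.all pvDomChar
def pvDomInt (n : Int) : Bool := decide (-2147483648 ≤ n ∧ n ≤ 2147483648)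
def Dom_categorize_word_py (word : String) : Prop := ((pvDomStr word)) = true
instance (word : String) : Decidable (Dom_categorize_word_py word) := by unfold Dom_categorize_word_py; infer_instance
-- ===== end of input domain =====

-- B looks the word up by binary search in a statically sorted keyword table instead of A's per-category membership scans (alternative algorithm, same table).


-- ===== PORT A =====
def pvCategories : List (String × List String) :=
  [("medical", ["patient", "doctor", "treatment", "medical"]),
   ("technical", ["server", "database", "api", "system"]),
   ("security", ["password", "access", "secure", "auth"]),
   ("general", ["the", "and", "for", "with", "how"])]

-- for category, keywords in categories.items(): if word in keywords: return category
def pvLoopA (word : String) : List (String × List String) → String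
  | [] => "other"
  | (category, keywords) :: rest =>
      if keywords.contains word then category else pvLoopA word rest

def categorize_word_py (word : String) : String :=
  pvLoopA word pvCategories

-- ===== PORT B =====
-- module-level sorted (keyword, category) table
def pvSorted : List (String × String) :=
  [("access", "security"), ("and", "general"), ("api", "technical"),
   ("auth", "security"), ("database", "technical"), ("doctor", "medical"),
   ("for", "general"), ("how", "general"), ("medical", "medical"),
   ("password", "security"), ("patient", "medical"), ("secure", "security"),
   ("server", "technical"), ("system", "technical"), ("the", "general"),
   ("treatment", "medical"), ("with", "general")]

-- the while-loop of Source B; the leading Nat fuel only makes the recursion structural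
-- (the loop always terminates before the fuel runs out); _SORTED[mid] is always in
-- range, getD's default is never used.
def pvBSearch (word : String) : Nat → Nat → Nat → String
  | 0, _, _ => "other"
  | fuel + 1, lo, hi =>
      if lo < hi then
        let mid := (lo + hi) / 2
        let p := pvSorted.getD mid ("", "")
        if p.1 < word then pvBSearch word fuel (mid + 1) hi
        else if word < p.1 then pvBSearch word fuel lo mid
        else p.2
      else "other"

def categorize_word_py_alt (word : String) : String :=
  pvBSearch word pvSorted.length 0 pvSorted.length

-- ===== PRECONDITION & SPEC =====
def Spec_categorize_word_py (word : String) (out : String) : Prop := out = categorize_word_py_alt word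
instance (word : String) (out : String) : Decidable (Spec_categorize_word_py word out) := by unfold Spec_categorize_word_py; infer_instance

-- ===== CLAIM (what is proved, stated in full; the proofs are below) =====
def Claim_equal_categorize_word_py : Prop := ∀ (word : String), Dom_categorize_word_py word → Spec_categorize_word_py word (categorize_word_py word)

-- ===== LEMMAS AND PROOFS =====

-- if word is none of the table's keywords, the binary search returns "other"
theorem pvBSearch_other (word : String) (hw : ∀ p ∈ pvSorted, word ≠ p.1) :
    ∀ (fuel lo hi : Nat), hi ≤ pvSorted.length → pvBSearch word fuel lo hi = "other" := by
  intro fuel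
  induction fuel with
  | zero => intro lo hi _; rfl
  | succ n ih =>
      intro lo hi hhi
      rw [pvBSearch]
      by_cases hlt : lo < hi
      · rw [if_pos hlt]
        show (if (pvSorted.getD ((lo + hi) / 2) ("", "")).1 < word
                then pvBSearch word n ((lo + hi) / 2 + 1) hi
              else if word < (pvSorted.getD ((lo + hi) / 2) ("", "")).1
                then pvBSearch word n lo ((lo + hi) / 2)
              else (pvSorted.getD ((lo + hi) / 2) ("", "")).2) = "other"
        by_cases h1 : (pvSorted.getD ((lo + hi) / 2) ("", "")).1 < word
        · rw [if_pos h1]; exact ih _ _ hhi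
        · rw [if_neg h1]
          by_cases h2 : word < (pvSorted.getD ((lo + hi) / 2) ("", "")).1
          · rw [if_pos h2]; exact ih _ _ (by omega)
          · -- neither < holds, so word = the keyword at mid, contradicting hw
            exfalso
            have hm : (lo + hi) / 2 < pvSorted.length := by omega
            have hmem : pvSorted.getD ((lo + hi) / 2) ("", "") ∈ pvSorted := by
              rw [List.getD_eq_getElem pvSorted ("", "") hm]
              exact List.getElem_mem hm
            rcases lt_trichotomy word (pvSorted.getD ((lo + hi) / 2) ("", "")).1 with h | h | h
            · exact h2 h
            · exact hw _ hmem h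
            · exact h1 h
      · rw [if_neg hlt]

-- if word is none of the keywords, A's loop returns "other"
theorem pvLoopA_other (word : String) (hw : ∀ p ∈ pvSorted, word ≠ p.1) :
    pvLoopA word pvCategories = "other" := by
  have hws : ∀ s ∈ pvSorted.map Prod.fst, word ≠ s := by
    intro s hs
    obtain ⟨p, hp, rfl⟩ := List.mem_map.1 hs
    exact hw p hp
  have p0 : word ≠ "patient" := hws _ (by simp [pvSorted])
  have p1 : word ≠ "doctor" := hws _ (by simp [pvSorted])
  have p2 : word ≠ "treatment" := hws _ (by simp [pvSorted])
  have p3 : word ≠ "medical" := hws _ (by simp [pvSorted])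
  have p4 : word ≠ "server" := hws _ (by simp [pvSorted])
  have p5 : word ≠ "database" := hws _ (by simp [pvSorted])
  have p6 : word ≠ "api" := hws _ (by simp [pvSorted])
  have p7 : word ≠ "system" := hws _ (by simp [pvSorted])
  have p8 : word ≠ "password" := hws _ (by simp [pvSorted])
  have p9 : word ≠ "access" := hws _ (by simp [pvSorted])
  have p10 : word ≠ "secure" := hws _ (by simp [pvSorted])
  have p11 : word ≠ "auth" := hws _ (by simp [pvSorted])
  have p12 : word ≠ "the" := hws _ (by simp [pvSorted])
  have p13 : word ≠ "and" := hws _ (by simp [pvSorted])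
  have p14 : word ≠ "for" := hws _ (by simp [pvSorted])
  have p15 : word ≠ "with" := hws _ (by simp [pvSorted])
  have p16 : word ≠ "how" := hws _ (by simp [pvSorted])
  simp [pvLoopA, pvCategories, p0, p1, p2, p3, p4, p5, p6, p7, p8, p9, p10, p11, p12,
    p13, p14, p15, p16]

-- ===== VERDICT (by name: the statement is the Claim_ definition above) =====
theorem categorize_word_py_spec : Claim_equal_categorize_word_py := by
  intro word _
  unfold Spec_categorize_word_py
  by_cases hk : ∃ p ∈ pvSorted, word = p.1
  · obtain ⟨p, hp, he⟩ := hk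
    subst he
    fin_cases hp <;>
      simp [categorize_word_py, categorize_word_py_alt, pvLoopA, pvCategories, pvBSearch,
        pvSorted, String.lt_iff_toList_lt] <;> decide
  · push Not at hk
    unfold categorize_word_py categorize_word_py_alt
    rw [pvLoopA_other word hk, pvBSearch_other word hk _ _ _ (le_refl _)]
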